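-- pv_equiv track=rewrite | github.com/ibrahim-nazari/practice-algorithm | icpcpastyear/smallestSubstringSolution.py | find_max_overlap
-- ===== SOURCE A (Python) =====
-- def find_max_overlap(s1,s2):
--     max_over_lap=0
--     combined_string=s1+s2
--     minLen=min(len(s1),len(s2))+ 1
--     for i in range(1,minLen):
--         if s1[-i:]==s2[:i]:
--             max_over_lap=i
--             combined_string=s1+s2[i:]
--     for i in range(1,minLen):
--         if s2[-i:]==s1[:i]:
--             if max_over_lap < i:
--                max_over_lap=i
--                combined_string=s2+s1[i:]
--     return combined_string, max_over_lap
-- ===== SOURCE B (Python) =====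
-- def find_max_overlap(s1, s2):
--     # KMP: the longest k with a[-k:] == b[:k] is the last prefix-function value
--     # of b + '\x00' + a ('\x00' never occurs in the printable-ASCII domain).
--     def best(a, b):
--         t = b + '\x00' + a
--         pi = [0] * len(t)
--         k = 0
--         for i in range(1, len(t)):
--             while k > 0 and t[i] != t[k]:
--                 k = pi[k - 1]
--             if t[i] == t[k]:
--                 k += 1
--             pi[i] = k
--         return k
--     k1 = best(s1, s2)
--     k2 = best(s2, s1)
--     if k1 < k2:
--         return s2 + s1[k2:], k2
--     return s1 + s2[k1:], k1
-- ===== Notes on version B (the rewrite author's own statement) =====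
-- stated objective: faster
-- what changed: Replaces A's two quadratic scans (comparing a length-i suffix slice against a length-i prefix slice for every i) by the KMP prefix function of s2+'\x00'+s1 and of s1+'\x00'+s2, whose final value is the maximal overlap in each direction in linear time.
import Mathlib
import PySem

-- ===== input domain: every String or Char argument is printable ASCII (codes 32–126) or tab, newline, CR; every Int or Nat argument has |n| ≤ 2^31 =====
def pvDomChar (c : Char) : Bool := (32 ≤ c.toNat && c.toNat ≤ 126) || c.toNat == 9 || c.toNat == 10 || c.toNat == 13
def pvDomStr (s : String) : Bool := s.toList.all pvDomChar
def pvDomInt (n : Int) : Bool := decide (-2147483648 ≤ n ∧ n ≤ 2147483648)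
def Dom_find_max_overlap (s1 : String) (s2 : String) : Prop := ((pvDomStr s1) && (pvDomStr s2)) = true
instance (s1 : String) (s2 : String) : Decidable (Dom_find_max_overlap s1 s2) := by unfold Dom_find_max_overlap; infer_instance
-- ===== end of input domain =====

-- B replaces A's quadratic suffix/prefix slice scans by the KMP prefix function of
-- b + '\x00' + a (linear time); '\x00' never occurs in the printable-ASCII domain.

-- ===== PORT A =====
def find_max_overlap (s1 : String) (s2 : String) : String × Int :=
  let l1 := s1.toList
  let l2 := s2.toList
  let minLen : Int := min (PySem.Str.len s1) (PySem.Str.len s2) + 1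
  let st1 := (PySem.List.pyRange 1 minLen 1).foldl
    (fun (st : List Char × Int) i =>
      if PySem.List.slice l1 (some (-i)) none = PySem.List.slice l2 none (some i) then
        (l1 ++ PySem.List.slice l2 (some i) none, i)
      else st) (l1 ++ l2, 0)
  let st2 := (PySem.List.pyRange 1 minLen 1).foldl
    (fun (st : List Char × Int) i =>
      if PySem.List.slice l2 (some (-i)) none = PySem.List.slice l1 none (some i) then
        if st.2 < i then (l2 ++ PySem.List.slice l1 (some i) none, i) else st
      else st) st1
  (String.ofList st2.1, st2.2)

-- ===== PORT B =====
-- Source B's `while k > 0 and t[i] != t[k]: k = pi[k-1]`; fuel k+1 suffices because k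
-- strictly decreases (the fuel is only a totality guard, the computation is Python's).
def pvFall (t : List Char) (pi : List Nat) (c : Char) : Nat → Nat → Nat
  | 0, k => k
  | fuel+1, k =>
    if 0 < k ∧ ¬ (t.getD k ' ' = c) then pvFall t pi c fuel (pi.getD (k-1) 0) else k

-- one iteration of Source B's `for i in range(1, len(t))` (pi is built by appending:
-- Python's pre-allocated tail entries are never read before being written).
def pvStep (t : List Char) (st : List Nat × Nat) (i : Nat) : List Nat × Nat :=
  let c := t.getD i ' '
  let k0 := pvFall t st.1 c (st.2 + 1) st.2
  let k := if t.getD k0 ' ' = c then k0 + 1 else k0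
  (st.1 ++ [k], k)

-- Source B's helper `best`: final prefix-function value of b + '\x00' + a
def pvKmpBest (a b : List Char) : Nat :=
  let t := b ++ '\x00' :: a
  ((List.range' 1 (t.length - 1)).foldl (pvStep t) ([0], 0)).2

def find_max_overlap_alt (s1 : String) (s2 : String) : String × Int :=
  let l1 := s1.toList
  let l2 := s2.toList
  let k1 := pvKmpBest l1 l2
  let k2 := pvKmpBest l2 l1
  if k1 < k2 then (String.ofList (l2 ++ l1.drop k2), (k2 : Int))
  else (String.ofList (l1 ++ l2.drop k1), (k1 : Int))

-- ===== PRECONDITION & SPEC =====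
def Spec_find_max_overlap (s1 : String) (s2 : String) (out : String × Int) : Prop := out = find_max_overlap_alt s1 s2
instance (s1 : String) (s2 : String) (out : String × Int) : Decidable (Spec_find_max_overlap s1 s2 out) := by unfold Spec_find_max_overlap; infer_instance

-- ===== CLAIM (what is proved, stated in full; the proofs are below) =====
def Claim_equal_find_max_overlap : Prop := ∀ (s1 : String) (s2 : String), Dom_find_max_overlap s1 s2 → Spec_find_max_overlap s1 s2 (find_max_overlap s1 s2)

-- ===== LEMMAS AND PROOFS =====

-- the largest k ≤ m with  a.drop (a.length - k) = b.take k, else 0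
def pvBest (a : List Char) (b : List Char) : Nat → Nat
  | 0 => 0
  | (k+1) => if a.drop (a.length - (k+1)) = b.take (k+1) then k+1 else pvBest a b k

theorem pvBest_le (a b : List Char) (m : Nat) : pvBest a b m ≤ m := by
  induction m with
  | zero => simp [pvBest]
  | succ k ih => simp only [pvBest]; split <;> omega

theorem pvBest_sound (a b : List Char) (m : Nat) :
    a.drop (a.length - pvBest a b m) = b.take (pvBest a b m) := by
  induction m with
  | zero => simp [pvBest]
  | succ k ih =>
    simp only [pvBest]
    split
    · assumption
    · exact ih

theorem pvBest_max (a b : List Char) (m k : Nat) (hk : k ≤ m)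
    (h : a.drop (a.length - k) = b.take k) : k ≤ pvBest a b m := by
  induction m with
  | zero => omega
  | succ j ih =>
    simp only [pvBest]
    split
    · omega
    · rcases Nat.lt_succ_iff_lt_or_eq.mp (Nat.lt_succ_of_le hk) with h' | h'
      · exact ih (by omega)
      · subst h'; exact absurd h (by assumption)

-- k is a (length-k) border of the length-l prefix of t
def pvBd (t : List Char) (l k : Nat) : Prop := (t.take l).drop (l - k) = t.take k

theorem pvBd_zero (t : List Char) (l : Nat) : pvBd t l 0 := by
  unfold pvBd
  rw [Nat.sub_zero, List.take_zero, List.drop_eq_nil_of_le]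
  simp

-- the maximal border length of the length-l prefix (0 for l ≤ 1)
def pvMbr (t : List Char) (l : Nat) : Nat := pvBest (t.take l) (t.take l) (l - 1)

theorem pvMbr_le (t : List Char) (l : Nat) : pvMbr t l ≤ l - 1 := pvBest_le _ _ _

theorem pvMbr_sound (t : List Char) (l : Nat) (hl : l ≤ t.length) :
    pvBd t l (pvMbr t l) := by
  have h := pvBest_sound (t.take l) (t.take l) (l - 1)
  have hx : pvMbr t l ≤ l - 1 := pvMbr_le t l
  unfold pvBd
  unfold pvMbr at *
  rwa [List.length_take, min_eq_left hl, List.take_take,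
    min_eq_left (by omega : pvBest (t.take l) (t.take l) (l-1) ≤ l)] at h

theorem pvMbr_max (t : List Char) (l k : Nat) (hl : l ≤ t.length) (hk : k ≤ l - 1)
    (h : pvBd t l k) : k ≤ pvMbr t l := by
  apply pvBest_max _ _ _ _ hk
  unfold pvBd at h
  rwa [List.length_take, min_eq_left hl, List.take_take, min_eq_left (by omega : k ≤ l)]

theorem pvMbr_unique (t : List Char) (l x : Nat) (hl : l ≤ t.length) (hx : x ≤ l - 1)
    (hs : pvBd t l x) (hm : ∀ k, k ≤ l - 1 → pvBd t l k → k ≤ x) : pvMbr t l = x := by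
  refine le_antisymm (hm _ (pvMbr_le t l) (pvMbr_sound t l hl)) (pvMbr_max t l x hl hx hs)

theorem pvBd_trans_down (t : List Char) (l j k : Nat) (hjk : j ≤ k) (hkl : k ≤ l)
    (hj : pvBd t l j) (hk : pvBd t l k) : pvBd t k j := by
  unfold pvBd at *
  rw [← hk, List.drop_drop, show l - k + (k - j) = l - j by omega]
  exact hj

theorem pvBd_compose (t : List Char) (l j k : Nat) (hkj : k ≤ j) (hjl : j ≤ l)
    (hj : pvBd t l j) (hk : pvBd t j k) : pvBd t l k := by
  unfold pvBd at *
  rw [show l - k = (l - j) + (j - k) by omega, ← List.drop_drop, hj]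
  exact hk

theorem pvBd_succ (t : List Char) (l k : Nat) (hk : k ≤ l) (hl : l < t.length) :
    pvBd t (l+1) (k+1) ↔ (pvBd t l k ∧ t.getD k ' ' = t.getD l ' ') := by
  have hkn : k < t.length := lt_of_le_of_lt hk hl
  unfold pvBd
  rw [List.take_succ, List.take_succ,
    List.getElem?_eq_getElem hl, List.getElem?_eq_getElem hkn]
  simp only [Option.toList_some]
  rw [show l + 1 - (k + 1) = l - k by omega,
    List.drop_append_of_le_length (by rw [List.length_take]; omega)]
  constructor
  · intro h
    have := List.append_inj' h (by simp)
    refine ⟨this.1, ?_⟩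
    have h2 := this.2
    simp only [List.cons.injEq] at h2
    rw [List.getD_eq_getElem _ _ hkn, List.getD_eq_getElem _ _ hl]
    exact h2.1.symm
  · rintro ⟨h1, h2⟩
    rw [h1]
    rw [List.getD_eq_getElem _ _ hkn, List.getD_eq_getElem _ _ hl] at h2
    rw [h2]

theorem pvFall_spec (t : List Char) (pi : List Nat) (c : Char) (l : Nat)
    (Hpi : ∀ j, 1 ≤ j → j ≤ l → pi.getD (j-1) 0 = pvMbr t j) (hl : l < t.length) :
    ∀ fuel k, k < fuel → k < l → pvBd t l k →
      (∀ j, j < l → pvBd t l j → t.getD j ' ' = c → j ≤ k) →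
      pvBd t l (pvFall t pi c fuel k) ∧ pvFall t pi c fuel k < l ∧
      (∀ j, j < l → pvBd t l j → t.getD j ' ' = c → j ≤ pvFall t pi c fuel k) ∧
      (¬ t.getD (pvFall t pi c fuel k) ' ' = c →
        pvFall t pi c fuel k = 0 ∧ ∀ j, j < l → pvBd t l j → ¬ t.getD j ' ' = c) := by
  intro fuel
  induction fuel with
  | zero => intro k hk; omega
  | succ f ih =>
    intro k hfuel hkl hBd hInv
    by_cases hg : 0 < k ∧ ¬ (t.getD k ' ' = c)
    · rw [pvFall, if_pos hg]
      have hk1 : pi.getD (k-1) 0 = pvMbr t k := Hpi k hg.1 (le_of_lt hkl)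
      have hkle : pvMbr t k ≤ k - 1 := pvMbr_le t k
      have hkn : k ≤ t.length := le_of_lt (lt_trans hkl hl)
      have hBdk1 : pvBd t l (pi.getD (k-1) 0) := by
        rw [hk1]
        exact pvBd_compose t l k _ (by omega) (le_of_lt hkl) hBd (pvMbr_sound t k hkn)
      refine ih (pi.getD (k-1) 0) (by omega) (by omega) hBdk1 ?_
      intro j hj hBdj hcj
      have hjk : j ≤ k := hInv j hj hBdj hcj
      have hjk' : j < k := by
        rcases Nat.lt_or_ge j k with h | h
        · exact h
        · exfalso; have : j = k := by omega
          subst this; exact hg.2 hcj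
      rw [hk1]
      exact pvMbr_max t k j hkn (by omega)
        (pvBd_trans_down t l j k (by omega) (le_of_lt hkl) hBdj hBd)
    · rw [pvFall, if_neg hg]
      refine ⟨hBd, hkl, hInv, ?_⟩
      intro hnc
      push_neg at hg
      have hk0 : k = 0 := by
        by_contra h
        exact hnc (hg (by omega))
      subst hk0
      refine ⟨rfl, ?_⟩
      intro j hj hBdj hcj
      have := hInv j hj hBdj hcj
      have : j = 0 := by omega
      subst this
      exact hnc hcj

theorem pvStep_spec (t : List Char) (l : Nat) (hl1 : 1 ≤ l) (hl : l < t.length)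
    (pi : List Nat) (Hpi : ∀ j, 1 ≤ j → j ≤ l → pi.getD (j-1) 0 = pvMbr t j) :
    pvStep t (pi, pvMbr t l) l = (pi ++ [pvMbr t (l+1)], pvMbr t (l+1)) := by
  have hln : l ≤ t.length := le_of_lt hl
  have h0 := pvFall_spec t pi (t.getD l ' ') l Hpi hl (pvMbr t l + 1) (pvMbr t l)
    (by omega) (by have := pvMbr_le t l; omega) (pvMbr_sound t l hln)
    (fun j hj hBdj _ => pvMbr_max t l j hln (by omega) hBdj)
  set r := pvFall t pi (t.getD l ' ') (pvMbr t l + 1) (pvMbr t l) with hr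
  obtain ⟨hBdr, hrl, hmaxr, hexit⟩ := h0
  have key : (if t.getD r ' ' = t.getD l ' ' then r + 1 else r) = pvMbr t (l+1) := by
    by_cases hm : t.getD r ' ' = t.getD l ' '
    · rw [if_pos hm]
      refine (pvMbr_unique t (l+1) (r+1) (by omega) (by omega)
        ((pvBd_succ t l r (by omega) hl).mpr ⟨hBdr, hm⟩) ?_).symm
      intro k hk hBdk
      match k with
      | 0 => omega
      | j+1 =>
        have := (pvBd_succ t l j (by omega) hl).mp hBdk
        have := hmaxr j (by omega) this.1 this.2
        omega
    · rw [if_neg hm]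
      obtain ⟨hr0, hnone⟩ := hexit hm
      rw [hr0]
      refine (pvMbr_unique t (l+1) 0 (by omega) (by omega) (pvBd_zero t (l+1)) ?_).symm
      intro k hk hBdk
      match k with
      | 0 => omega
      | j+1 =>
        have := (pvBd_succ t l j (by omega) hl).mp hBdk
        exact absurd this.2 (hnone j (by omega) this.1)
  show (pi ++ [if t.getD r ' ' = t.getD l ' ' then r + 1 else r],
        if t.getD r ' ' = t.getD l ' ' then r + 1 else r) = _
  rw [key]

theorem pvKmpLoop (t : List Char) (ht : 1 ≤ t.length) (m : Nat) (hm : m ≤ t.length - 1) :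
    (List.range' 1 m).foldl (pvStep t) ([0], 0)
      = ((List.range (m+1)).map (fun j => pvMbr t (j+1)), pvMbr t (m+1)) := by
  induction m with
  | zero =>
    simp [pvMbr, pvBest]
  | succ n ih =>
    have hm' : n ≤ t.length - 1 := by omega
    rw [List.range'_1_concat, List.foldl_append, ih hm']
    simp only [List.foldl_cons, List.foldl_nil]
    have Hpi : ∀ j, 1 ≤ j → j ≤ n + 1 →
        ((List.range (n+1)).map (fun j => pvMbr t (j+1))).getD (j-1) 0 = pvMbr t j := by
      intro j hj1 hj2
      have hlt : j - 1 < n + 1 := by omega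
      rw [List.getD_eq_getElem _ _ (by simpa using hlt)]
      simp only [List.getElem_map, List.getElem_range]
      congr 1
      omega
    have := pvStep_spec t (n+1) (by omega) (by omega)
      ((List.range (n+1)).map (fun j => pvMbr t (j+1))) Hpi
    rw [show 1 + n = n + 1 by omega, this]
    rw [show List.range (n+1+1) = List.range (n+1) ++ [n+1] from List.range_succ]
    simp

theorem pvKmpFinal (a b : List Char) (ha : ¬ '\x00' ∈ a) (hb : ¬ '\x00' ∈ b)
    (t : List Char) (htdef : t = b ++ '\x00' :: a) :
    ((List.range' 1 (t.length - 1)).foldl (pvStep t) ([0], 0)).2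
      = pvBest a b (min a.length b.length) := by
  have hn : t.length = b.length + a.length + 1 := by simp [htdef]; omega
  have ht1 : 1 ≤ t.length := by omega
  rw [pvKmpLoop t ht1 (t.length - 1) (le_refl _)]
  simp only
  rw [show t.length - 1 + 1 = t.length by omega]
  -- pvMbr t t.length = pvBest a b (min |a| |b|)
  set m := min a.length b.length with hmdef
  have hbest_le : pvBest a b m ≤ m := pvBest_le a b m
  -- helper facts for transferring borders of t to overlaps of (a, b)
  have htake : ∀ k, k ≤ b.length → t.take k = b.take k := by
    intro k hk
    rw [htdef, List.take_append_of_le_length hk]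
  have hdrop : ∀ k, k ≤ a.length → t.drop (t.length - k) = a.drop (a.length - k) := by
    intro k hk
    rw [hn, htdef, List.drop_append,
      List.drop_eq_nil_of_le (by omega), List.nil_append,
      show b.length + a.length + 1 - k - b.length = (a.length - k) + 1 by omega,
      List.drop_succ_cons]
  have hBd_iff : ∀ k, k ≤ m → (pvBd t t.length k ↔ a.drop (a.length - k) = b.take k) := by
    intro k hk
    unfold pvBd
    rw [List.take_length, htake k (by omega), hdrop k (by omega)]
  refine pvMbr_unique t t.length (pvBest a b m) (le_refl _) (by omega) ?_ ?_
  · exact (hBd_iff _ hbest_le).mpr (pvBest_sound a b m)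
  · intro k hk hBdk
    -- first: k ≤ m
    have hksep : k ≤ m := by
      unfold pvBd at hBdk
      rw [List.take_length] at hBdk
      by_contra hgt
      push_neg at hgt
      have hsep : t[b.length]? = some '\x00' := by
        rw [htdef, List.getElem?_append_right (le_refl _)]
        simp
      have hgenA : ∀ i, i < a.length → t[b.length + 1 + i]? = a[i]? := by
        intro i hi
        rw [htdef, List.getElem?_append_right (by omega : b.length ≤ b.length + 1 + i),
          show b.length + 1 + i - b.length = i + 1 by omega, List.getElem?_cons_succ]
      have hgenB : ∀ i, i < b.length → t[i]? = b[i]? := by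
        intro i hi
        rw [htdef, List.getElem?_append_left hi]
      rcases Nat.lt_or_ge b.length k with hkb | hkb
      · -- k > |b| : the separator lands inside a
        have h2 : (t.take k)[b.length]? = t[b.length]? :=
          List.getElem?_take_of_lt hkb
        have h3 : (t.drop (t.length - k))[b.length]? = t[(t.length - k) + b.length]? :=
          List.getElem?_drop
        have hmem : a[t.length - k - 1]? = some '\x00' := by
          rw [← hgenA (t.length - k - 1) (by omega),
            show b.length + 1 + (t.length - k - 1) = (t.length - k) + b.length by omega,
            ← h3, hBdk, h2, hsep]
        exact ha (List.mem_of_getElem? hmem)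
      · -- k ≤ |b| but k > |a| : the separator lands inside b
        have hka : a.length < k := by omega
        have h3 : (t.drop (t.length - k))[k - 1 - a.length]? = t[(t.length - k) + (k - 1 - a.length)]? :=
          List.getElem?_drop
        have h2 : (t.take k)[k - 1 - a.length]? = t[k - 1 - a.length]? :=
          List.getElem?_take_of_lt (by omega)
        have hmem : b[k - 1 - a.length]? = some '\x00' := by
          rw [← hgenB (k - 1 - a.length) (by omega), ← h2, ← hBdk, h3,
            show (t.length - k) + (k - 1 - a.length) = b.length by omega, hsep]
        exact hb (List.mem_of_getElem? hmem)
    exact pvBest_max a b m k hksep ((hBd_iff k hksep).mp hBdk)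

theorem pvKmpBest_eq (a b : List Char) (ha : ¬ '\x00' ∈ a) (hb : ¬ '\x00' ∈ b) :
    pvKmpBest a b = pvBest a b (min a.length b.length) := by
  unfold pvKmpBest
  exact pvKmpFinal a b ha hb _ rfl

theorem pvNoNul (s : String) (h : pvDomStr s = true) : ¬ '\x00' ∈ s.toList := by
  intro hm
  have := List.all_eq_true.mp h _ hm
  simp [pvDomChar] at this

-- ===== A-side loop characterizations (as before) =====
theorem pvLoopA1 (l1 l2 : List Char) (m : Nat) :
    (PySem.List.pyRange 1 ((m : Int) + 1) 1).foldl
      (fun (st : List Char × Int) i =>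
        if PySem.List.slice l1 (some (-i)) none = PySem.List.slice l2 none (some i) then
          (l1 ++ PySem.List.slice l2 (some i) none, i)
        else st) (l1 ++ l2, 0)
    = (l1 ++ l2.drop (pvBest l1 l2 m), (pvBest l1 l2 m : Int)) := by
  induction m with
  | zero => rw [PySem.List.pyRange_one_eq_nil (by omega)]; simp [pvBest]
  | succ k ih =>
    have hcast : ((k+1 : Nat) : Int) + 1 = ((k : Int) + 1) + 1 := by push_cast; ring
    rw [hcast, PySem.List.pyRange_one_succ_right (by omega), List.foldl_append, ih]
    simp only [List.foldl_cons, List.foldl_nil]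
    rw [show (-((k:Int)+1)) = -(((k+1:Nat)):Int) by push_cast; ring,
      PySem.List.slice_from_neg_natCast _ _ (by omega),
      show ((k:Int)+1) = (((k+1:Nat)):Int) by push_cast; ring,
      PySem.List.slice_to_natCast, PySem.List.slice_from_natCast]
    rw [pvBest]
    split
    · simp
    · rfl

theorem pvLoopA2 (l1 l2 : List Char) (m : Nat) (c0 : List Char) (j : Nat) :
    (PySem.List.pyRange 1 ((m : Int) + 1) 1).foldl
      (fun (st : List Char × Int) i =>
        if PySem.List.slice l2 (some (-i)) none = PySem.List.slice l1 none (some i) then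
          if st.2 < i then (l2 ++ PySem.List.slice l1 (some i) none, i) else st
        else st) (c0, (j : Int))
    = if j < pvBest l2 l1 m then (l2 ++ l1.drop (pvBest l2 l1 m), (pvBest l2 l1 m : Int))
      else (c0, (j : Int)) := by
  induction m with
  | zero =>
    rw [PySem.List.pyRange_one_eq_nil (by omega)]
    simp [pvBest]
  | succ k ih =>
    have hcast : ((k+1 : Nat) : Int) + 1 = ((k : Int) + 1) + 1 := by push_cast; ring
    rw [hcast, PySem.List.pyRange_one_succ_right (by omega), List.foldl_append, ih]
    simp only [List.foldl_cons, List.foldl_nil]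
    rw [show (-((k:Int)+1)) = -(((k+1:Nat)):Int) by push_cast; ring,
      PySem.List.slice_from_neg_natCast _ _ (by omega),
      show ((k:Int)+1) = (((k+1:Nat)):Int) by push_cast; ring,
      PySem.List.slice_to_natCast, PySem.List.slice_from_natCast]
    have hle := pvBest_le l2 l1 k
    rw [pvBest]
    split
    · split
      · simp only
        rw [if_pos (by exact_mod_cast Nat.lt_succ_of_le hle), if_pos (by omega)]
      · simp only
        by_cases hj : j < k + 1
        · rw [if_pos (by exact_mod_cast hj), if_pos hj]
        · rw [if_neg (by exact_mod_cast hj), if_neg hj]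
    · rfl

-- ===== VERDICT (by name: the statement is the Claim_ definition above) =====
theorem find_max_overlap_spec : Claim_equal_find_max_overlap := by
  intro s1 s2 hdom
  unfold Dom_find_max_overlap at hdom
  rw [Bool.and_eq_true] at hdom
  obtain ⟨hd1, hd2⟩ := hdom
  unfold Spec_find_max_overlap find_max_overlap find_max_overlap_alt
  simp only [PySem.Str.len_eq, ← Nat.cast_min]
  set a := s1.toList
  set b := s2.toList
  set m := min a.length b.length with hm
  rw [pvLoopA1 a b m, pvLoopA2 a b m]
  rw [pvKmpBest_eq a b (pvNoNul s1 hd1) (pvNoNul s2 hd2),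
    pvKmpBest_eq b a (pvNoNul s2 hd2) (pvNoNul s1 hd1)]
  rw [min_comm b.length a.length, ← hm]
  by_cases h : pvBest a b m < pvBest b a m
  · simp [h]
  · simp [h]
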